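-- pv_equiv track=rewrite | github.com/julio-1610/LaboratorioADA-GC | Laboratorio10/A vicious Pikeman/solution.py | solution
-- ===== SOURCE A (Python) =====
-- def solution(N, T, tasks):
-- 	total, penalty = 0, 0
-- 	for i, t in enumerate(tasks):
-- 		if total + t > T:
-- 			return i, penalty
-- 		total += t
-- 		penalty = (penalty + total) % 1000000007
-- 	return N, penalty
-- ===== SOURCE B (Python) =====
-- def _find_hit(T, P1):
--     for idx, p in enumerate(P1):
--         if p > T:
--             return idx
--     return None
--
--
-- def solution(N, T, tasks):
--     # Phase 1: materialize the prefix-sum table (unreduced integers).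
--     P1 = []
--     s = 0
--     for t in tasks:
--         s += t
--         P1.append(s)
--     # Phase 2: first prefix sum exceeding T (None if all fit).
--     hit = _find_hit(T, P1)
--     i = len(tasks) if hit is None else hit
--     # Phase 3: penalty over the accepted prefix sums.
--     penalty = 0
--     for p in P1[:i]:
--         penalty = (penalty + p) % 1000000007
--     return (N if hit is None else i), penalty
-- ===== Notes on version B (the rewrite author's own statement) =====
-- stated objective: alternative
-- what changed: B replaces A's single fused running-sum loop with a three-phase pipeline: build the prefix-sum table, scan it for the first sum exceeding T, then fold the accepted prefix sums into the penalty.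
import Mathlib
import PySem

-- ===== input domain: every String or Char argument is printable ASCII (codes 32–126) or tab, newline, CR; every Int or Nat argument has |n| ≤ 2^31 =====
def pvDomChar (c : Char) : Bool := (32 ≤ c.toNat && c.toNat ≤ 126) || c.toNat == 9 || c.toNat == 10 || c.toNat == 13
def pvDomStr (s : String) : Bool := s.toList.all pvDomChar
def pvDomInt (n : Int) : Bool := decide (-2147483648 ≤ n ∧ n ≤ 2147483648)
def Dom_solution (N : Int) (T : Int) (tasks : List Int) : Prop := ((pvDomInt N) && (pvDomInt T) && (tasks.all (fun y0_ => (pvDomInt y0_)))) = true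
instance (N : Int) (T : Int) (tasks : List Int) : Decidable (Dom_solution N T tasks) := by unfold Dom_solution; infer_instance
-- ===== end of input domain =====

-- B replaces A's fused running-sum loop with a three-phase pipeline (prefix-sum table, scan, penalty fold); alternative decomposition, same cost.


-- ===== PORT A =====
-- A's loop: early return (i, penalty) when total+t > T, else accumulate total and penalty.
def solGo (T N : Int) : List Int → Int → Int → Int → Int × Int
  | [], _, _, pen => (N, pen)
  | t :: rest, i, total, pen =>
    if total + t > T then (i, pen)
    else solGo T N rest (i + 1) (total + t) (PySem.Int.mod (pen + (total + t)) 1000000007)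

def solution (N : Int) (T : Int) (tasks : List Int) : Int × Int :=
  solGo T N tasks 0 0 0

-- ===== PORT B =====
-- Phase 1 of Source B: the prefix-sum table P1 (running sum s carried through the loop).
def buildP (s : Int) : List Int → List Int
  | [] => []
  | t :: rest => (s + t) :: buildP (s + t) rest

-- Phase 2 of Source B: index of the first prefix sum exceeding T (None if all fit).
def findHit (T : Int) : List Int → Option Nat
  | [] => none
  | p :: rest => if p > T then some 0 else (findHit T rest).map (· + 1)

-- Phase 3 of Source B: fold the accepted prefix sums into the penalty.
def penaltyFold (l : List Int) (pen : Int) : Int :=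
  l.foldl (fun pen p => PySem.Int.mod (pen + p) 1000000007) pen

def solution_alt (N : Int) (T : Int) (tasks : List Int) : Int × Int :=
  let P1 := buildP 0 tasks
  match findHit T P1 with
  | none => (N, penaltyFold P1 0)
  | some h => ((h : Int), penaltyFold (P1.take h) 0)

-- ===== PRECONDITION & SPEC =====
def Spec_solution (N : Int) (T : Int) (tasks : List Int) (out : Int × Int) : Prop := out = solution_alt N T tasks
instance (N : Int) (T : Int) (tasks : List Int) (out : Int × Int) : Decidable (Spec_solution N T tasks out) := by unfold Spec_solution; infer_instance

-- ===== CLAIM (what is proved, stated in full; the proofs are below) =====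
def Claim_equal_solution : Prop := ∀ (N : Int) (T : Int) (tasks : List Int), Dom_solution N T tasks → Spec_solution N T tasks (solution N T tasks)

-- ===== LEMMAS AND PROOFS =====
theorem solGo_eq (T N : Int) (tasks : List Int) : ∀ (i total pen : Int),
    solGo T N tasks i total pen =
      match findHit T (buildP total tasks) with
      | none => (N, penaltyFold (buildP total tasks) pen)
      | some h => (i + (h : Int), penaltyFold ((buildP total tasks).take h) pen) := by
  induction tasks with
  | nil => intro i total pen; simp [solGo, buildP, findHit, penaltyFold]
  | cons t rest ih =>
    intro i total pen
    simp only [solGo, buildP, findHit]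
    by_cases h : total + t > T
    · simp [h, penaltyFold]
    · simp only [h, if_false, ih]
      cases hf : findHit T (buildP (total + t) rest) with
      | none => simp [penaltyFold]
      | some k =>
        simp only [Option.map_some, Prod.mk.injEq, List.take_succ_cons]
        exact ⟨by push_cast; ring, by simp [penaltyFold]⟩

-- ===== VERDICT (by name: the statement is the Claim_ definition above) =====
theorem solution_spec : Claim_equal_solution := by
  intro N T tasks _
  show solution N T tasks = solution_alt N T tasks
  simp only [solution, solution_alt, solGo_eq]
  cases findHit T (buildP 0 tasks) <;> simp
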